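-- pv_equiv track=rewrite | github.com/Franco2607/Logica-de-programacion | Parte 4/08. BatmanDay.py | sum_alert_cuadricula
-- ===== SOURCE A (Python) =====
-- def sum_alert_cuadricula(sensores, center_x, center_y) -> int:
--
--     total = 0
--
--     for x in range(center_x - 1, center_x + 2):
--         for y in range(center_y - 1, center_y + 2):
--             for sensor in sensores:
--                 if sensor[0] == x and sensor[1] == y:
--                     total += sensor[2]
--
--     return total
-- ===== SOURCE B (Python) =====
-- def sum_alert_cuadricula(sensores, center_x, center_y) -> int:
--     total = 0
--     for sensor in sensores:
--         dx = sensor[0] - center_x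
--         dy = sensor[1] - center_y
--         if dx in (-1, 0, 1) and dy in (-1, 0, 1):
--             total += sensor[2]
--     return total
-- ===== Notes on version B (the rewrite author's own statement) =====
-- stated objective: simpler
-- what changed: Replaced the 3x3-cells-times-sensors rescan (triple nested loop) by a single pass over the sensors testing each sensor's offset from the center against {-1,0,1}.
import Mathlib
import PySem

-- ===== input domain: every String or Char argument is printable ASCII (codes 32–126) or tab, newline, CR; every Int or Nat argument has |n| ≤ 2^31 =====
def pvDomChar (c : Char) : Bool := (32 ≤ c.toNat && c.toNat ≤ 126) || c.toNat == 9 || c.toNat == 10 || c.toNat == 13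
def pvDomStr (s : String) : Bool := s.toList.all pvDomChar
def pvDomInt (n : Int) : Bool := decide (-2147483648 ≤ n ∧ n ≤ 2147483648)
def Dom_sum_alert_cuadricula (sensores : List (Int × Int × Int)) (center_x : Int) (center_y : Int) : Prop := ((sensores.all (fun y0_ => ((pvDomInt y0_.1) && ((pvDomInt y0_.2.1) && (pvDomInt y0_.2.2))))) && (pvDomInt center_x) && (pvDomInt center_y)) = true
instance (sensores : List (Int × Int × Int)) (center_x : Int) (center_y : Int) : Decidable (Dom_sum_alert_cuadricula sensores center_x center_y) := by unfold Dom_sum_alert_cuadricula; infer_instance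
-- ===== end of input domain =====

-- B replaces A's 3x3-cells-times-sensors triple loop by a single pass over the sensors (objective: simpler).
-- ===== PORT A =====
-- literal port of A: triple nested loop (3x3 cells, rescanning all sensors per cell)
def sum_alert_cuadricula (sensores : List (Int × Int × Int)) (center_x : Int) (center_y : Int) : Int :=
  (PySem.List.pyRange (center_x - 1) (center_x + 2) 1).foldl (fun total x =>
    (PySem.List.pyRange (center_y - 1) (center_y + 2) 1).foldl (fun total y =>
      sensores.foldl (fun total sensor =>
        if sensor.1 = x ∧ sensor.2.1 = y then total + sensor.2.2 else total) total) total) 0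

-- ===== PORT B =====
-- single pass over the sensors, testing each offset against {-1,0,1}
def sum_alert_cuadricula_alt (sensores : List (Int × Int × Int)) (center_x : Int) (center_y : Int) : Int :=
  sensores.foldl (fun total sensor =>
    let dx := sensor.1 - center_x
    let dy := sensor.2.1 - center_y
    if (dx = -1 ∨ dx = 0 ∨ dx = 1) ∧ (dy = -1 ∨ dy = 0 ∨ dy = 1) then total + sensor.2.2 else total) 0

-- ===== PRECONDITION & SPEC =====
def Spec_sum_alert_cuadricula (sensores : List (Int × Int × Int)) (center_x : Int) (center_y : Int) (out : Int) : Prop := out = sum_alert_cuadricula_alt sensores center_x center_y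
instance (sensores : List (Int × Int × Int)) (center_x : Int) (center_y : Int) (out : Int) : Decidable (Spec_sum_alert_cuadricula sensores center_x center_y out) := by unfold Spec_sum_alert_cuadricula; infer_instance

-- ===== CLAIM =====
def Claim_equal_sum_alert_cuadricula : Prop := ∀ (sensores : List (Int × Int × Int)) (center_x : Int) (center_y : Int), Dom_sum_alert_cuadricula sensores center_x center_y → Spec_sum_alert_cuadricula sensores center_x center_y (sum_alert_cuadricula sensores center_x center_y)

-- ===== LEMMAS AND PROOFS =====

-- a conditional-accumulate foldl is the starting value plus a sum over the list
theorem pv_foldl_if_sum (l : List (Int × Int × Int)) (p : (Int × Int × Int) → Prop)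
    [DecidablePred p] (t0 : Int) :
    l.foldl (fun total s => if p s then total + s.2.2 else total) t0
      = t0 + (l.map (fun s => if p s then s.2.2 else 0)).sum := by
  induction l generalizing t0 with
  | nil => simp
  | cons a l ih =>
    simp only [List.foldl_cons, List.map_cons, List.sum_cons, ih]
    split_ifs <;> ring

theorem pv_range3 (c : Int) :
    PySem.List.pyRange (c - 1) (c + 2) 1 = [c - 1, c, c + 1] := by
  rw [PySem.List.pyRange_one]
  have h : (c + 2 - (c - 1)).toNat = 3 := by omega
  rw [h]
  simp [List.range_succ]
  omega

theorem pv_sum_map_add (l : List (Int × Int × Int)) (f g : (Int × Int × Int) → Int) :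
    (l.map f).sum + (l.map g).sum = (l.map (fun s => f s + g s)).sum := by
  induction l with
  | nil => simp
  | cons a l ih => simp only [List.map_cons, List.sum_cons]; rw [← ih]; ring

set_option maxHeartbeats 1000000 in
theorem sum_alert_cuadricula_spec : Claim_equal_sum_alert_cuadricula := by
  intro sensores cx cy _
  unfold Spec_sum_alert_cuadricula sum_alert_cuadricula sum_alert_cuadricula_alt
  rw [pv_range3 cx, pv_range3 cy]
  simp only [List.foldl_cons, List.foldl_nil]
  simp only [pv_foldl_if_sum, zero_add]
  repeat rw [pv_sum_map_add]
  apply congrArg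
  apply List.map_congr_left
  intro s _
  split_ifs <;> omega
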